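-- pv_equiv track=rewrite | github.com/czlwang/mlhc_final_project | embeddings.py | separate_cuis
-- ===== SOURCE A (Python) =====
-- def separate_cuis(cui_to_idx):
--     cui_diags = {}
--     cui_procs = {}
--     cui_drugs = {}
--
--     for cui, idx in cui_to_idx.items():
--         prefix, code = cui.split('_')
--         if prefix == 'IDX':
--             code = code.replace('.', '')
--             cui_diags[code] = idx
--         elif prefix == 'C':
--             cui_procs[code] = idx
--         elif prefix == 'N':
--             cui_drugs[code] = idx
--
--     return cui_diags, cui_procs, cui_drugs
-- ===== SOURCE B (Python) =====
-- def separate_cuis(cui_to_idx):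
--     # Three per-bucket dict comprehensions instead of one branching loop.
--     # The split is forced in each comprehension so a key without exactly one
--     # '_' raises ValueError just as the original does.
--     cui_diags = {code.replace('.', ''): idx
--                  for cui, idx in cui_to_idx.items()
--                  for prefix, code in [cui.split('_')]
--                  if prefix == 'IDX'}
--     cui_procs = {code: idx
--                  for cui, idx in cui_to_idx.items()
--                  for prefix, code in [cui.split('_')]
--                  if prefix == 'C'}
--     cui_drugs = {code: idx
--                  for cui, idx in cui_to_idx.items()
--                  for prefix, code in [cui.split('_')]
--                  if prefix == 'N'}
--     return cui_diags, cui_procs, cui_drugs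
-- ===== Notes on version B (the rewrite author's own statement) =====
-- stated objective: idiomatic
-- what changed: Replaces the single loop that branches into three mutable dicts with three independent filtered dict comprehensions over the items, one per prefix bucket.
import Mathlib
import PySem

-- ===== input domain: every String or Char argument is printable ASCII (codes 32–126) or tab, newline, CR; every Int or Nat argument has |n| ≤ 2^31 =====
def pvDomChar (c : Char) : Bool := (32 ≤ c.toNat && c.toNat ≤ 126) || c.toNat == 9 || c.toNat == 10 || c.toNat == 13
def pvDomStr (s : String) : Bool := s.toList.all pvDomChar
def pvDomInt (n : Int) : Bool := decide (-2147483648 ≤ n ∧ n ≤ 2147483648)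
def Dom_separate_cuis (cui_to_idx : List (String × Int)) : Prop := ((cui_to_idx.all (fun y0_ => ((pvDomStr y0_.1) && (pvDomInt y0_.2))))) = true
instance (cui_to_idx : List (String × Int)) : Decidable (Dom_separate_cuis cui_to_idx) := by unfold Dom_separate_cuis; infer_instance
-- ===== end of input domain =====

-- B changes the decomposition: three independent filtered dict comprehensions (one per prefix
-- bucket) instead of one loop branching into three mutable dicts; same cost, more idiomatic.

-- ===== PORT A =====
-- one pass; the `| _ => acc` arm is Python's ValueError on unpacking the split, excluded by Pre_
def separate_cuis (cui_to_idx : List (String × Int)) : (List (String × Int)) × (List (String × Int)) × (List (String × Int)) :=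
  let s := cui_to_idx.foldl
    (fun (acc : PySem.Dict String Int × PySem.Dict String Int × PySem.Dict String Int) kv =>
      match PySem.Str.split? kv.1 "_" with
      | some [pref, code] =>
        if pref == "IDX" then (acc.1.insert (PySem.Str.replace code "." "") kv.2, acc.2.1, acc.2.2)
        else if pref == "C" then (acc.1, acc.2.1.insert code kv.2, acc.2.2)
        else if pref == "N" then (acc.1, acc.2.1, acc.2.2.insert code kv.2)
        else acc
      | _ => acc)
    (PySem.Dict.empty, PySem.Dict.empty, PySem.Dict.empty)
  (s.1.items, s.2.1.items, s.2.2.items)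

-- ===== PORT B =====
-- one dict comprehension: filter/map the items to one bucket, then build the dict
def pvSplit2 (s : String) : Option (String × String) :=
  (PySem.Str.split? s "_").bind (fun parts =>
    if parts.length = 2 then some (parts.getD 0 "", parts.getD 1 "") else none)

def pvBucket (cui_to_idx : List (String × Int)) (pref : String) (f : String → String) : List (String × Int) :=
  (PySem.Dict.ofList (cui_to_idx.filterMap (fun kv =>
    (pvSplit2 kv.1).bind (fun pc =>
      if pc.1 == pref then some (f pc.2, kv.2) else none)))).items

def separate_cuis_alt (cui_to_idx : List (String × Int)) : (List (String × Int)) × (List (String × Int)) × (List (String × Int)) :=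
  (pvBucket cui_to_idx "IDX" (fun c => PySem.Str.replace c "." ""),
   pvBucket cui_to_idx "C" id,
   pvBucket cui_to_idx "N" id)

-- ===== PRECONDITION & SPEC =====
-- Pre_ excludes exactly the inputs with a key not splitting on '_' into two parts: there the
-- Python A (and B alike) raises ValueError on tuple unpacking.
def Pre_separate_cuis (cui_to_idx : List (String × Int)) : Prop :=
  (cui_to_idx.all (fun kv => ((PySem.Str.split? kv.1 "_").getD []).length == 2)) = true
instance (cui_to_idx : List (String × Int)) : Decidable (Pre_separate_cuis cui_to_idx) := by unfold Pre_separate_cuis; infer_instance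

def pvWitness_separate_cuis : (List (String × Int)) := [("IDX_4.2", 1), ("C_99", 2), ("N_ab", 3), ("X_z", 4)]

def Spec_separate_cuis (cui_to_idx : List (String × Int)) (out : (List (String × Int)) × (List (String × Int)) × (List (String × Int))) : Prop := out = separate_cuis_alt cui_to_idx
instance (cui_to_idx : List (String × Int)) (out : (List (String × Int)) × (List (String × Int)) × (List (String × Int))) : Decidable (Spec_separate_cuis cui_to_idx out) := by unfold Spec_separate_cuis; infer_instance

-- ===== CLAIM (what is proved, stated in full; the proofs are below) =====
def Claim_equal_separate_cuis : Prop := ∀ (cui_to_idx : List (String × Int)), Dom_separate_cuis cui_to_idx → Pre_separate_cuis cui_to_idx → Spec_separate_cuis cui_to_idx (separate_cuis cui_to_idx)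

-- ===== LEMMAS AND PROOFS =====

-- the branching fold over a triple of dicts splits into three independent per-bucket folds
theorem pv_loop_split (l : List (String × Int))
    (d1 d2 d3 : PySem.Dict String Int) :
    l.foldl
      (fun (acc : PySem.Dict String Int × PySem.Dict String Int × PySem.Dict String Int) kv =>
        match PySem.Str.split? kv.1 "_" with
        | some [pref, code] =>
          if pref == "IDX" then (acc.1.insert (PySem.Str.replace code "." "") kv.2, acc.2.1, acc.2.2)
          else if pref == "C" then (acc.1, acc.2.1.insert code kv.2, acc.2.2)
          else if pref == "N" then (acc.1, acc.2.1, acc.2.2.insert code kv.2)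
          else acc
        | _ => acc) (d1, d2, d3)
    = (l.foldl (fun d kv =>
          match PySem.Str.split? kv.1 "_" with
          | some [px, code] => if px == "IDX" then d.insert (PySem.Str.replace code "." "") kv.2 else d
          | _ => d) d1,
       l.foldl (fun d kv =>
          match PySem.Str.split? kv.1 "_" with
          | some [px, code] => if px == "C" then d.insert code kv.2 else d
          | _ => d) d2,
       l.foldl (fun d kv =>
          match PySem.Str.split? kv.1 "_" with
          | some [px, code] => if px == "N" then d.insert code kv.2 else d
          | _ => d) d3) := by
  induction l generalizing d1 d2 d3 with
  | nil => rfl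
  | cons kv t ih =>
    simp only [List.foldl_cons]
    rcases hs : PySem.Str.split? kv.1 "_" with _ | ⟨_ | ⟨p, _ | ⟨c, _ | _⟩⟩⟩ <;>
      simp only [] <;>
      first
      | exact ih _ _ _
      | (by_cases h1 : p == "IDX"
         · have : p = "IDX" := by simpa using h1
           subst this; simp only [h1]; exact ih _ _ _
         · by_cases h2 : p == "C"
           · have : p = "C" := by simpa using h2
             subst this; simp only [h1, h2]; exact ih _ _ _
           · by_cases h3 : p == "N"
             · have : p = "N" := by simpa using h3
               subst this; simp only [h1, h2, h3]; exact ih _ _ _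
             · simp only [h1, h2, h3]; exact ih _ _ _)

-- each bucket of B, after List.foldl_filterMap, is the per-bucket fold
theorem pvBucket_eq_foldl (l : List (String × Int)) (pref : String) (f : String → String) :
    pvBucket l pref f
    = (l.foldl (fun (d : PySem.Dict String Int) kv =>
        match PySem.Str.split? kv.1 "_" with
        | some [px, code] => if px == pref then d.insert (f code) kv.2 else d
        | _ => d) PySem.Dict.empty).items := by
  unfold pvBucket
  have hof : ∀ (xs : List (String × Int)),
      PySem.Dict.ofList xs = xs.foldl (fun d kv => d.insert kv.1 kv.2) PySem.Dict.empty := fun _ => rfl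
  rw [hof, List.foldl_filterMap]
  congr 1
  apply PySem.List.foldl_congr_mem
  intro d kv _
  unfold pvSplit2
  rcases PySem.Str.split? kv.1 "_" with _ | ⟨_ | ⟨p, _ | ⟨c, _ | _⟩⟩⟩ <;>
    simp only [Option.bind_none, Option.bind_some, List.length_cons, List.length_nil] <;>
    first
      | rfl
      | (by_cases h : p = pref <;> simp [h])

-- ===== VERDICT (by name: the statement is the Claim_ definition above) =====
theorem separate_cuis_spec : Claim_equal_separate_cuis := by
  intro l _ _
  unfold Spec_separate_cuis separate_cuis separate_cuis_alt
  rw [pv_loop_split, pvBucket_eq_foldl, pvBucket_eq_foldl, pvBucket_eq_foldl]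
  simp only [id]
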